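-- pv_equiv track=rewrite | github.com/YeeaaahMan/ReportFilter | main.py | create_page
-- ===== SOURCE A (Python) =====
-- def median(array):
--     array.sort()
--     if len(array)%2 == 1:
--         return array[len(array)//2]
--     else:
--         return round((array[len(array)//2] + array[len(array)//2 - 1])/2)
--
-- def table(project, LA):
--     statuses = sorted(LA[project].keys())
--     result = """<table class="brd">
--     <tr>
--         <th width="80">&nbsp;</th>   <th width="80">Status </th>    <th width="60">Count </th>    <th>Last Activity </th>
--     </tr>
--     """
--     count = 0
--
--     for i, stts in enumerate(statuses):
--         if i == 0:
--             result += """<tr>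
--         <th rowspan="{0}">{1}</th>""".format(len(statuses), project)
--         else:
--             result += "<tr>\n"
--
--         c = sum([o[0] for o in LA[project][stts]])  # count
--         count += c
--         m = max([o[1] for o in LA[project][stts]])  # m
--         la = " {0} days {1:0>2} hours {2:0>2} minutes".format(m // 1440, (m % 1440) // 60, m % 60)
--
--         result += """<td>{0}</td>    <td>{1}</td>    <td>{2}</td>
--     </tr>\n""".format(stts, c, la)
--
--     result += "</table>\n"
--     result += "<p>Общее количество заявок:  <b> -- | {0}</b></p><br>\n".format(count)
--
--     return result
--
-- def create_page(LA):
--     Style = """<style type="text/css">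
--     table { border-collapse: collapse;
--     font-family: 'Calibri'; font-size: 11pt}
--     table th {text-align: "left" },
--     table tr {text-align: "right"},
--     table td { padding: 0 3px; },
--     table.brd th,
--     table.brd td { border: 1px solid #000; }
--     b { font-family: 'Calibri'; font-size: 11pt }
--     p { font-family: 'Calibri'; font-size: 11pt; margin: 0 }
-- </style>"""
--
--     count_list = list()
--     #la_list = list()
--     la_list = [0] # добавляю в список 0 для того, чтобы в случае пустого списка LA была возможность рассчитать mx и mdn
--     for prj in LA:
--         for stts in LA[prj]:
--             count_list.extend([i[0] for i in LA[prj][stts]])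
--             la_list.extend([i[1] for i in LA[prj][stts]])
--     mx = max(la_list)
--     mx = " {0} days {1:0>2} hours {2:0>2} minutes".format(mx // 1440, (mx % 1440) // 60, mx % 60)
--     mdn = median(la_list)
--     mdn = " {0} days {1:0>2} hours {2:0>2} minutes".format(mdn // 1440, (mdn % 1440) // 60, mdn % 60)
--
--     Common = """<p><b>Общее количество заявок во всех проектах:  -- | {0}</b><br>
-- Максимальное время ответа: &nbsp; <b>{1}</b><br>
-- Среднее время ответа (медианное): &nbsp; <b>{2}</b></p><br>""".format(sum(count_list), mx, mdn)
--     """Common += <b>Критические ситуации</b>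
-- <p>1.</p><br>
-- <b>Ситуации, требующие внимания</b><br>
-- <p>1.</p><br>
-- <b>Проблемы в работе</b>
-- <p>1.</p><br>
-- <b>Прочее</b><br>
-- <p>1.</p><br>"""
--
--     Tables = ""
--     sorted_tuple = sorted([(key.lower(), key) for key in LA.keys()])
--     for prj in [t[1] for t in sorted_tuple]:
--         Tables += table(prj, LA)
--
--     return Style + Common + Tables
-- ===== SOURCE B (Python) =====
-- # B: one traversal over LA aggregates per-(project,status) (count-sum, activity-max) and the flat
-- # activity list into a nested index; then globals + tables are pure formatting over the index
-- # (no re-scan of LA, integer-arithmetic banker's-rounding median instead of float round()).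
--
-- def _dur(m):
--     return " {0} days {1:0>2} hours {2:0>2} minutes".format(m // 1440, (m % 1440) // 60, m % 60)
--
-- def _median(xs):
--     xs = sorted(xs)
--     n = len(xs)
--     if n % 2 == 1:
--         return xs[n // 2]
--     q, r = divmod(xs[n // 2] + xs[n // 2 - 1], 2)
--     if r == 0:
--         return q
--     return q if q % 2 == 0 else q + 1  # round-half-to-even; exact for |values| <= 2**31
--
-- _HEADER = """<table class="brd">
--     <tr>
--         <th width="80">&nbsp;</th>   <th width="80">Status </th>    <th width="60">Count </th>    <th>Last Activity </th>
--     </tr>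
--     """
--
-- def create_page(LA):
--     Style = """<style type="text/css">
--     table { border-collapse: collapse;
--     font-family: 'Calibri'; font-size: 11pt}
--     table th {text-align: "left" },
--     table tr {text-align: "right"},
--     table td { padding: 0 3px; },
--     table.brd th,
--     table.brd td { border: 1px solid #000; }
--     b { font-family: 'Calibri'; font-size: 11pt }
--     p { font-family: 'Calibri'; font-size: 11pt; margin: 0 }
-- </style>"""
--
--     # single pass: nested index agg = [(project, pcount, [(status, count, max_activity)])]
--     agg = []
--     total = 0
--     la_flat = [0]
--     for prj, d in LA.items():
--         pa = []
--         pcount = 0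
--         for stts, pairs in d.items():
--             c = 0
--             m = pairs[0][1]
--             for cnt, act in pairs:
--                 c += cnt
--                 if act > m:
--                     m = act
--                 la_flat.append(act)
--             pa.append((stts, c, m))
--             pcount += c
--         agg.append((prj, pcount, pa))
--         total += pcount
--
--     Common = """<p><b>Общее количество заявок во всех проектах:  -- | {0}</b><br>
-- Максимальное время ответа: &nbsp; <b>{1}</b><br>
-- Среднее время ответа (медианное): &nbsp; <b>{2}</b></p><br>""".format(
--         total, _dur(max(la_flat)), _dur(_median(la_flat)))
--
--     parts = [Style, Common]
--     for prj, pcount, pa in sorted(agg, key=lambda t: (t[0].lower(), t[0])):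
--         parts.append(_HEADER)
--         rows = sorted(pa, key=lambda t: t[0])
--         for i, (stts, c, m) in enumerate(rows):
--             head = """<tr>
--         <th rowspan="{0}">{1}</th>""".format(len(rows), prj) if i == 0 else "<tr>\n"
--             parts.append(head + """<td>{0}</td>    <td>{1}</td>    <td>{2}</td>
--     </tr>\n""".format(stts, c, _dur(m)))
--         parts.append("</table>\n")
--         parts.append("<p>Общее количество заявок:  <b> -- | {0}</b></p><br>\n".format(pcount))
--     return "".join(parts)
-- ===== Notes on version B (the rewrite author's own statement) =====
-- stated objective: alternative
-- what changed: B replaces A's flatten-then-rescan shape (a global flattening loop plus a per-project table() helper that re-scans LA[project][status] with sum/max comprehensions) by one aggregation pass over LA that builds a nested index [(project, pcount, [(status, count, max)])] together with the flat activity list, after which the HTML is pure formatting over the index; the even-median round() is computed by integer round-half-to-even instead of float arithmetic.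
-- outside the precondition, e.g. on create_page({'P': {'open': []}}): A raises ValueError, B raises IndexError
import Mathlib
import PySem

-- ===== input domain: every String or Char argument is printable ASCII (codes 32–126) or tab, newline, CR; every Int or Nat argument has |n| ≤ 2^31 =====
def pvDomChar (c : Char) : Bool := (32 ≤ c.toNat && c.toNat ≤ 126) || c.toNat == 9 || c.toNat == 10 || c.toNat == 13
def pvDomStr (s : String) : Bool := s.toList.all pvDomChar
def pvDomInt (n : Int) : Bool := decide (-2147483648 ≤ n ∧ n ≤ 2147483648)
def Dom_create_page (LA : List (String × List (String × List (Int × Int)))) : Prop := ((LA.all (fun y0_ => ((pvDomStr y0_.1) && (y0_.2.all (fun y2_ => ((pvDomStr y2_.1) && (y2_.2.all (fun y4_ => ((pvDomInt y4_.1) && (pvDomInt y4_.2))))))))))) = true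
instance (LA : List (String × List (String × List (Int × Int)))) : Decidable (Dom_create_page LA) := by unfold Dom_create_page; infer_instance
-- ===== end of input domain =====

-- B replaces A's flatten-then-rescan-per-status shape by one aggregation pass over LA feeding a
-- nested index that the formatting then reads (objective: alternative decomposition, not speed).

-- ===== PORT A =====
-- string constants and the shared "{} days {:0>2} hours {:0>2} minutes" formatter (both Pythons
-- emit these exact literals; pvPad2 is exact for the nonempty ASCII digit strings produced here)
def pvPad2 (s : String) : String := if PySem.Str.len s < 2 then "0" ++ s else s

def pyDur (m : Int) : String :=
  " " ++ PySem.Int.toStr (PySem.Int.floordiv m 1440) ++ " days "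
    ++ pvPad2 (PySem.Int.toStr (PySem.Int.floordiv (PySem.Int.mod m 1440) 60)) ++ " hours "
    ++ pvPad2 (PySem.Int.toStr (PySem.Int.mod m 60)) ++ " minutes"

def pvStyle : String := "<style type=\"text/css\">\n    table { border-collapse: collapse;\n    font-family: 'Calibri'; font-size: 11pt}\n    table th {text-align: \"left\" },\n    table tr {text-align: \"right\"},\n    table td { padding: 0 3px; },\n    table.brd th,\n    table.brd td { border: 1px solid #000; }\n    b { font-family: 'Calibri'; font-size: 11pt }\n    p { font-family: 'Calibri'; font-size: 11pt; margin: 0 }\n</style>"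

def pvTableHeader : String := "<table class=\"brd\">\n    <tr>\n        <th width=\"80\">&nbsp;</th>   <th width=\"80\">Status </th>    <th width=\"60\">Count </th>    <th>Last Activity </th>\n    </tr>\n    "

def pvCommon (total : Int) (mxs mdns : String) : String :=
  "<p><b>Общее количество заявок во всех проектах:  -- | " ++ PySem.Int.toStr total
    ++ "</b><br>\nМаксимальное время ответа: &nbsp; <b>" ++ mxs
    ++ "</b><br>\nСреднее время ответа (медианное): &nbsp; <b>" ++ mdns ++ "</b></p><br>"

def pvFooter (count : Int) : String :=
  "<p>Общее количество заявок:  <b> -- | " ++ PySem.Int.toStr count ++ "</b></p><br>\n"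

def pvRowHead (n : Int) (project : String) : String :=
  "<tr>\n        <th rowspan=\"" ++ PySem.Int.toStr n ++ "\">" ++ project ++ "</th>"

def pvRowTds (stts : String) (c : Int) (la : String) : String :=
  "<td>" ++ stts ++ "</td>    <td>" ++ PySem.Int.toStr c ++ "</td>    <td>" ++ la ++ "</td>\n    </tr>\n"

-- A's median(array): array.sort(); odd → middle, even → round((mid+mid-1)/2).
-- round() on the exact half-integer is hand-ported as banker's rounding (exact: |values| ≤ 2^31,
-- so the float arithmetic A does is exact); pyGetD default 0 is never read (callers pass a
-- nonempty list and the indices are in range).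
def medianA (array : List Int) : Int :=
  let arr := PySem.List.sorted array (fun x => x) false
  if PySem.Int.mod (PySem.List.len arr) 2 == 1 then
    PySem.List.pyGetD arr (PySem.Int.floordiv (PySem.List.len arr) 2) 0
  else
    let s := PySem.List.pyGetD arr (PySem.Int.floordiv (PySem.List.len arr) 2) 0
           + PySem.List.pyGetD arr (PySem.Int.floordiv (PySem.List.len arr) 2 - 1) 0
    if PySem.Int.mod s 2 == 0 then PySem.Int.floordiv s 2
    else if PySem.Int.mod (PySem.Int.floordiv s 2) 2 == 0 then PySem.Int.floordiv s 2
    else PySem.Int.floordiv s 2 + 1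

-- A's table(project, LA): dict lookups ported as getD with a default that is never read at the
-- call sites (project is a key of LA; every status is a key of d); max([...]) of a list that is
-- nonempty under Pre_ is max?.getD 0.
def tableA (project : String) (LA : List (String × List (String × List (Int × Int)))) : String :=
  let d := (PySem.Dict.mk LA).getD project []
  let statuses := PySem.List.sorted ((PySem.Dict.mk d).keys) (fun s => s) false
  let res := (PySem.List.enumerate statuses).foldl
    (fun (acc : String × Int) is =>
      let r1 := if is.1 == 0 then acc.1 ++ pvRowHead (PySem.List.len statuses) project
                else acc.1 ++ "<tr>\n"
      let lst := (PySem.Dict.mk d).getD is.2 []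
      let c := (lst.map (fun o => o.1)).sum
      let m := (PySem.List.max? (lst.map (fun o => o.2)) (fun y => y)).getD 0
      (r1 ++ pvRowTds is.2 c (pyDur m), acc.2 + c))
    (pvTableHeader, (0 : Int))
  res.1 ++ "</table>\n" ++ pvFooter res.2

def create_page (LA : List (String × List (String × List (Int × Int)))) : String :=
  -- first loop: count_list = [], la_list = [0], extended per (prj, stts) via dict lookups
  let cl := (LA.map (fun p => p.1)).foldl
    (fun (acc : List Int × List Int) prj =>
      let d := (PySem.Dict.mk LA).getD prj []
      (d.map (fun q => q.1)).foldl
        (fun (acc2 : List Int × List Int) stts =>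
          let lst := (PySem.Dict.mk d).getD stts []
          (acc2.1 ++ lst.map (fun i => i.1), acc2.2 ++ lst.map (fun i => i.2)))
        acc)
    ([], [0])
  let mxs := pyDur ((PySem.List.max? cl.2 (fun y => y)).getD 0)   -- max(la_list); nonempty (seed 0)
  let mdns := pyDur (medianA cl.2)
  let common := pvCommon cl.1.sum mxs mdns
  let sorted_tuple := PySem.List.sorted2
      ((LA.map (fun p => p.1)).map (fun k => (PySem.Str.lower k, k)))
      (fun t => t.1) (fun t => t.2) false
  let tables := (sorted_tuple.map (fun t => t.2)).foldl (fun t prj => t ++ tableA prj LA) ""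
  pvStyle ++ common ++ tables

-- ===== PORT B =====
-- B's _median: same sort, but the even case via divmod and integer round-half-to-even
def medianB (xs : List Int) : Int :=
  let s := PySem.List.sorted xs (fun x => x) false
  let n := PySem.List.len s
  if PySem.Int.mod n 2 == 1 then PySem.List.pyGetD s (PySem.Int.floordiv n 2) 0
  else
    match PySem.Int.divmod? (PySem.List.pyGetD s (PySem.Int.floordiv n 2) 0
                             + PySem.List.pyGetD s (PySem.Int.floordiv n 2 - 1) 0) 2 with
    | some qr => if qr.2 == 0 then qr.1
                 else if PySem.Int.mod qr.1 2 == 0 then qr.1 else qr.1 + 1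
    | none => 0   -- unreachable: the divisor is 2

def create_page_alt (LA : List (String × List (String × List (Int × Int)))) : String :=
  -- single pass: agg = [(prj, pcount, [(stts, c, m)])], total, la_flat (seeded [0]);
  -- m is seeded with pairs[0][1] (pyGetD default never read: pairs ≠ [] under Pre_)
  let acc := LA.foldl
    (fun (acc : List (String × Int × List (String × Int × Int)) × Int × List Int) p =>
      let inner := p.2.foldl
        (fun (acc2 : List (String × Int × Int) × Int × List Int) q =>
          let r := q.2.foldl
            (fun (acc3 : Int × Int × List Int) pr =>
              (acc3.1 + pr.1, (if pr.2 > acc3.2.1 then pr.2 else acc3.2.1), acc3.2.2 ++ [pr.2]))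
            (0, (PySem.List.pyGetD q.2 0 (0, 0)).2, acc2.2.2)
          (acc2.1 ++ [(q.1, r.1, r.2.1)], acc2.2.1 + r.1, r.2.2))
        ([], 0, acc.2.2)
      (acc.1 ++ [(p.1, inner.2.1, inner.1)], acc.2.1 + inner.2.1, inner.2.2))
    ([], 0, [0])
  let common := pvCommon acc.2.1 (pyDur ((PySem.List.max? acc.2.2 (fun y => y)).getD 0))
                  (pyDur (medianB acc.2.2))
  let parts := (PySem.List.sorted2 acc.1 (fun t => PySem.Str.lower t.1) (fun t => t.1) false).foldl
    (fun (ps : List String) t =>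
      let rows := PySem.List.sorted t.2.2 (fun r => r.1) false
      let ps2 := (PySem.List.enumerate rows).foldl
        (fun (ps2 : List String) ir =>
          ps2 ++ [(if ir.1 == 0 then pvRowHead (PySem.List.len rows) t.1 else "<tr>\n")
                   ++ pvRowTds ir.2.1 ir.2.2.1 (pyDur ir.2.2.2)])
        (ps ++ [pvTableHeader])
      ps2 ++ ["</table>\n", pvFooter t.2.1])
    [pvStyle, common]
  PySem.Str.join "" parts

-- ===== PRECONDITION & SPEC =====
-- Pre_ excludes (a) duplicate project/status keys — the Lean association lists model Python
-- dicts, which cannot carry duplicates — and (b) an empty activity list for some status, on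
-- which A raises ValueError (max([])).
def Pre_create_page (LA : List (String × List (String × List (Int × Int)))) : Prop :=
  (LA.map (fun p => p.1)).Nodup ∧
  ∀ p ∈ LA, (p.2.map (fun q => q.1)).Nodup ∧ ∀ q ∈ p.2, q.2 ≠ []
instance (LA : List (String × List (String × List (Int × Int)))) : Decidable (Pre_create_page LA) := by
  unfold Pre_create_page; infer_instance

def pvWitness_create_page : (List (String × List (String × List (Int × Int)))) :=
  [("Alpha", [("open", [(1, 2000)]), ("done", [(2, 70), (1, 9)])]), ("beta", [("open", [(4, 1)])])]

def Spec_create_page (LA : List (String × List (String × List (Int × Int)))) (out : String) : Prop := out = create_page_alt LA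
instance (LA : List (String × List (String × List (Int × Int)))) (out : String) : Decidable (Spec_create_page LA out) := by unfold Spec_create_page; infer_instance

-- ===== CLAIM (what is proved, stated in full; the proofs are below) =====
def Claim_equal_create_page : Prop := ∀ (LA : List (String × List (String × List (Int × Int)))), Dom_create_page LA → Pre_create_page LA → Spec_create_page LA (create_page LA)

-- ===== LEMMAS AND PROOFS =====

-- proof-side abbreviations for the aggregated values
def pvCsum (l : List (Int × Int)) : Int := (l.map (fun o => o.1)).sum
def pvCmax (l : List (Int × Int)) : Int :=
  (l.map (fun o => o.2)).foldl (fun m v => if v > m then v else m) ((PySem.List.pyGetD l 0 (0, 0)).2)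
def pvStT (q : String × List (Int × Int)) : String × Int × Int := (q.1, pvCsum q.2, pvCmax q.2)
def pvPcount (d : List (String × List (Int × Int))) : Int := (d.map (fun q => pvCsum q.2)).sum
def pvPrjT (p : String × List (String × List (Int × Int))) : String × Int × List (String × Int × Int) :=
  (p.1, pvPcount p.2, p.2.map pvStT)
def pvFlatSnd (d : List (String × List (Int × Int))) : List Int := d.flatMap (fun q => q.2.map (fun o => o.2))
def pvFlatFst (LA : List (String × List (String × List (Int × Int)))) : List Int :=
  LA.flatMap (fun p => p.2.flatMap (fun q => q.2.map (fun i => i.1)))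
def pvFlatAll (LA : List (String × List (String × List (Int × Int)))) : List Int :=
  LA.flatMap (fun p => pvFlatSnd p.2)

def strConcat : List String → String
  | [] => ""
  | s :: r => s ++ strConcat r

theorem strConcat_append (l1 l2 : List String) : strConcat (l1 ++ l2) = strConcat l1 ++ strConcat l2 := by
  induction l1 with
  | nil => simp [strConcat]
  | cons x t ih => simp [strConcat, ih, String.append_assoc]

theorem str_ext {s t : String} (h : s.toList = t.toList) : s = t := by
  have hs : String.ofList s.toList = s := String.ofList_toList
  have ht : String.ofList t.toList = t := String.ofList_toList
  rw [← hs, ← ht, h]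

theorem ofList_append (l1 l2 : List Char) :
    String.ofList (l1 ++ l2) = String.ofList l1 ++ String.ofList l2 :=
  str_ext (by simp [String.toList_ofList, String.toList_append])

theorem join_empty_eq_strConcat (l : List String) : PySem.Str.join "" l = strConcat l := by
  induction l with
  | nil => rfl
  | cons x r ih =>
    cases r with
    | nil => simp [PySem.Str.join, PySem.Chars.join_singleton, strConcat, String.ofList_toList,
        String.append_empty]  -- join "" [x] = x ++ ""
    | cons y t =>
      simp only [PySem.Str.join] at ih ⊢
      simp only [List.map_cons] at ih ⊢
      rw [strConcat, ← ih]
      have h0 : ("" : String).toList = [] := rfl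
      rw [h0, PySem.Chars.join_cons_cons, List.append_nil, ofList_append]
      simp [String.ofList_toList]

theorem lookupSelf {ν : Type} (l : List (String × ν)) (p : String × ν) (h : p ∈ l)
    (hn : (l.map (fun x => x.1)).Nodup) (d0 : ν) : (PySem.Dict.mk l).getD p.1 d0 = p.2 := by
  have hmem : (p.1, p.2) ∈ (PySem.Dict.mk l).items := by simpa using h
  exact PySem.Dict.getD_of_mem_items _ hmem (by simpa [PySem.Dict.keys_mk] using hn) d0

theorem insertBy_map {α β : Type} (f : α → β) (ba : α → α → Bool) (bb : β → β → Bool)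
    (h : ∀ a b, bb (f a) (f b) = ba a b) (x : α) (l : List α) :
    PySem.List.insertBy bb (f x) (l.map f) = (PySem.List.insertBy ba x l).map f := by
  induction l with
  | nil => simp [PySem.List.insertBy]
  | cons y ys ih => simp [PySem.List.insertBy, h]; split <;> simp [ih]

theorem sorted_map {α β κ : Type} [LinearOrder κ] (f : α → β) (l : List α) (key : β → κ) :
    PySem.List.sorted (l.map f) key false = (PySem.List.sorted l (fun x => key (f x)) false).map f := by
  rw [PySem.List.sorted_eq_foldl_insertBy, PySem.List.sorted_eq_foldl_insertBy]
  have aux : ∀ (l : List α) (acc : List α),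
      (l.map f).foldl (fun acc x => PySem.List.insertBy (fun a b => decide (key a < key b)) x acc) (acc.map f)
        = (l.foldl (fun acc x => PySem.List.insertBy (fun a b => decide (key (f a) < key (f b))) x acc) acc).map f := by
    intro l
    induction l with
    | nil => intro acc; simp
    | cons x t ih =>
      intro acc
      simp only [List.map_cons, List.foldl_cons]
      rw [insertBy_map f (fun a b => decide (key (f a) < key (f b))) (fun a b => decide (key a < key b)) (fun _ _ => rfl)]
      exact ih _
  simpa using aux l []

theorem sorted2_map {α β κ₁ κ₂ : Type} [LinearOrder κ₁] [LinearOrder κ₂] (f : α → β) (l : List α)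
    (k1 : β → κ₁) (k2 : β → κ₂) :
    PySem.List.sorted2 (l.map f) k1 k2 false
      = (PySem.List.sorted2 l (fun x => k1 (f x)) (fun x => k2 (f x)) false).map f := by
  show (l.map f).foldl (fun acc x => PySem.List.insertBy
      (fun a b => decide (k1 a < k1 b) || (!decide (k1 b < k1 a) && decide (k2 a < k2 b))) x acc) []
    = (l.foldl (fun acc x => PySem.List.insertBy
      (fun a b => decide (k1 (f a) < k1 (f b)) || (!decide (k1 (f b) < k1 (f a)) && decide (k2 (f a) < k2 (f b)))) x acc) []).map f
  have aux : ∀ (l : List α) (acc : List α),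
      (l.map f).foldl (fun acc x => PySem.List.insertBy
        (fun a b => decide (k1 a < k1 b) || (!decide (k1 b < k1 a) && decide (k2 a < k2 b))) x acc) (acc.map f)
      = (l.foldl (fun acc x => PySem.List.insertBy
        (fun a b => decide (k1 (f a) < k1 (f b)) || (!decide (k1 (f b) < k1 (f a)) && decide (k2 (f a) < k2 (f b)))) x acc) acc).map f := by
    intro l
    induction l with
    | nil => intro acc; simp
    | cons x t ih =>
      intro acc
      simp only [List.map_cons, List.foldl_cons]
      rw [insertBy_map f _ _ (fun _ _ => rfl)]
      exact ih _
  simpa using aux l []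

theorem enumerate_map {α β : Type} (f : α → β) (l : List α) (s : Int) :
    PySem.List.enumerate (l.map f) s = (PySem.List.enumerate l s).map (fun p => (p.1, f p.2)) := by
  induction l generalizing s with
  | nil => simp [PySem.List.enumerate_nil]
  | cons x t ih => simp [PySem.List.enumerate_cons, ih]

theorem foldl_str_append {γ : Type} (l : List γ) (g : γ → String) (a : String) :
    l.foldl (fun s x => s ++ g x) a = a ++ strConcat (l.map g) := by
  induction l generalizing a with
  | nil => simp [strConcat, String.append_empty]
  | cons x t ih => simp [strConcat, ih, String.append_assoc]

theorem strConcat_flatMap {γ : Type} (l : List γ) (g : γ → List String) :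
    strConcat (l.flatMap g) = strConcat (l.map (fun x => strConcat (g x))) := by
  induction l with
  | nil => rfl
  | cons x t ih => simp [List.flatMap_cons, strConcat_append, strConcat, ih]

theorem tripleFold (l : List (Int × Int)) (c0 m0 : Int) (la0 : List Int) :
    l.foldl (fun (a : Int × Int × List Int) pr =>
        (a.1 + pr.1, (if pr.2 > a.2.1 then pr.2 else a.2.1), a.2.2 ++ [pr.2])) (c0, m0, la0)
      = (c0 + (l.map (fun o => o.1)).sum,
         (l.map (fun o => o.2)).foldl (fun m v => if v > m then v else m) m0,
         la0 ++ l.map (fun o => o.2)) := by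
  induction l generalizing c0 m0 la0 with
  | nil => simp
  | cons x t ih => simp [ih, add_assoc]

theorem cmax_eq_max (l : List (Int × Int)) (h : l ≠ []) :
    pvCmax l = (PySem.List.max? (l.map (fun o => o.2)) (fun y => y)).getD 0 := by
  match l, h with
  | (x :: t), _ =>
    have hstep : (fun (m v : Int) => if v > m then v else m) = fun m v => max m v := by
      funext m v; simp only [max_def]; split_ifs <;> omega
    simp [pvCmax, PySem.List.pyGetD_zero_cons, PySem.List.max?_id_cons, hstep]


theorem sum_flatMap_int {γ : Type} (l : List γ) (f : γ → List Int) :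
    (l.flatMap f).sum = (l.map (fun x => (f x).sum)).sum := by
  induction l with
  | nil => simp
  | cons x t ih => simp [ih]

theorem total_eq (LA : List (String × List (String × List (Int × Int)))) :
    (LA.map (fun p => pvPcount p.2)).sum = (pvFlatFst LA).sum := by
  rw [pvFlatFst, sum_flatMap_int]
  congr 1
  apply List.map_congr_left
  intro p _
  rw [sum_flatMap_int]
  rfl

theorem median_eq (xs : List Int) : medianB xs = medianA xs := by
  unfold medianA medianB
  simp [PySem.Int.divmod?, PySem.Int.floordiv, PySem.Int.mod]

-- per-table rendering pieces, shared by both canonical forms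
def pvRowsOf (t : String × Int × List (String × Int × Int)) : List (String × Int × Int) :=
  PySem.List.sorted t.2.2 (fun r => r.1) false
def pvRowStr (t : String × Int × List (String × Int × Int)) (ir : Int × String × Int × Int) : String :=
  (if ir.1 == 0 then pvRowHead (PySem.List.len (pvRowsOf t)) t.1 else "<tr>\n")
    ++ pvRowTds ir.2.1 ir.2.2.1 (pyDur ir.2.2.2)
def pvPartList (t : String × Int × List (String × Int × Int)) : List String :=
  [pvTableHeader] ++ (PySem.List.enumerate (pvRowsOf t)).map (pvRowStr t)
    ++ ["</table>\n", pvFooter t.2.1]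

def pvCanon (LA : List (String × List (String × List (Int × Int)))) : String :=
  pvStyle
    ++ pvCommon (pvFlatFst LA).sum
         (pyDur ((PySem.List.max? (0 :: pvFlatAll LA) (fun y => y)).getD 0))
         (pyDur (medianA (0 :: pvFlatAll LA)))
    ++ strConcat ((PySem.List.sorted2 LA (fun p => PySem.Str.lower p.1) (fun p => p.1) false).map
         (fun p => strConcat (pvPartList (pvPrjT p))))

theorem midFold (d : List (String × List (Int × Int))) (pa0 : List (String × Int × Int))
    (pc0 : Int) (la0 : List Int) :
    d.foldl (fun (acc2 : List (String × Int × Int) × Int × List Int) q =>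
        let r := q.2.foldl
          (fun (acc3 : Int × Int × List Int) pr =>
            (acc3.1 + pr.1, (if pr.2 > acc3.2.1 then pr.2 else acc3.2.1), acc3.2.2 ++ [pr.2]))
          (0, (PySem.List.pyGetD q.2 0 (0, 0)).2, acc2.2.2)
        (acc2.1 ++ [(q.1, r.1, r.2.1)], acc2.2.1 + r.1, r.2.2))
      (pa0, pc0, la0)
    = (pa0 ++ d.map pvStT, pc0 + pvPcount d, la0 ++ pvFlatSnd d) := by
  rw [PySem.List.foldl_congr_mem _ _
        (fun (acc2 : List (String × Int × Int) × Int × List Int) q =>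
          (acc2.1 ++ [pvStT q], acc2.2.1 + pvCsum q.2, acc2.2.2 ++ q.2.map (fun o => o.2))) _
        (fun acc x _ => by simp [tripleFold, pvStT, pvCsum, pvCmax])]
  induction d generalizing pa0 pc0 la0 with
  | nil => simp [pvPcount, pvFlatSnd]
  | cons q t ih =>
    rw [List.foldl_cons, ih]
    simp [pvPcount, pvFlatSnd, add_assoc]

theorem outFold (LA : List (String × List (String × List (Int × Int))))
    (agg0 : List (String × Int × List (String × Int × Int))) (t0 : Int) (la0 : List Int) :
    LA.foldl (fun (acc : List (String × Int × List (String × Int × Int)) × Int × List Int) p =>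
        let inner := p.2.foldl
          (fun (acc2 : List (String × Int × Int) × Int × List Int) q =>
            let r := q.2.foldl
              (fun (acc3 : Int × Int × List Int) pr =>
                (acc3.1 + pr.1, (if pr.2 > acc3.2.1 then pr.2 else acc3.2.1), acc3.2.2 ++ [pr.2]))
              (0, (PySem.List.pyGetD q.2 0 (0, 0)).2, acc2.2.2)
            (acc2.1 ++ [(q.1, r.1, r.2.1)], acc2.2.1 + r.1, r.2.2))
          ([], 0, acc.2.2)
        (acc.1 ++ [(p.1, inner.2.1, inner.1)], acc.2.1 + inner.2.1, inner.2.2))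
      (agg0, t0, la0)
    = (agg0 ++ LA.map pvPrjT, t0 + (LA.map (fun p => pvPcount p.2)).sum, la0 ++ pvFlatAll LA) := by
  rw [PySem.List.foldl_congr_mem _ _
        (fun (acc : List (String × Int × List (String × Int × Int)) × Int × List Int) p =>
          (acc.1 ++ [pvPrjT p], acc.2.1 + pvPcount p.2, acc.2.2 ++ pvFlatSnd p.2)) _
        (fun acc x _ => by simp [midFold, pvPrjT])]
  induction LA generalizing agg0 t0 la0 with
  | nil => simp [pvFlatAll]
  | cons p t ih =>
    rw [List.foldl_cons, ih]
    simp [pvFlatAll, add_assoc]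

theorem Acl (LA : List (String × List (String × List (Int × Int))))
    (h1 : (LA.map (fun p => p.1)).Nodup)
    (h2 : ∀ p ∈ LA, (p.2.map (fun q => q.1)).Nodup) :
    (LA.map (fun p => p.1)).foldl
      (fun (acc : List Int × List Int) prj =>
        let d := (PySem.Dict.mk LA).getD prj []
        (d.map (fun q => q.1)).foldl
          (fun (acc2 : List Int × List Int) stts =>
            let lst := (PySem.Dict.mk d).getD stts []
            (acc2.1 ++ lst.map (fun i => i.1), acc2.2 ++ lst.map (fun i => i.2)))
          acc)
      ([], [0])
    = (pvFlatFst LA, 0 :: pvFlatAll LA) := by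
  rw [List.foldl_map]
  rw [PySem.List.foldl_congr_mem _ _
      (fun (acc : List Int × List Int) p =>
        (acc.1 ++ p.2.flatMap (fun q => q.2.map (fun i => i.1)),
         acc.2 ++ p.2.flatMap (fun q => q.2.map (fun i => i.2)))) _
      (fun acc p hp => by
        simp only [lookupSelf LA p hp h1]
        rw [List.foldl_map]
        rw [PySem.List.foldl_congr_mem _ _
            (fun (acc2 : List Int × List Int) (q : String × List (Int × Int)) =>
              (acc2.1 ++ q.2.map (fun i => i.1), acc2.2 ++ q.2.map (fun i => i.2))) _
            (fun acc2 q hq => by simp only [lookupSelf p.2 q hq (h2 p hp)])]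
        obtain ⟨a1, a2⟩ := acc
        rw [PySem.List.foldl_prod_mk
              (f := fun (c : List Int) (q : String × List (Int × Int)) =>
                c ++ q.2.map (fun i => i.1))
              (g := fun (c : List Int) (q : String × List (Int × Int)) =>
                c ++ q.2.map (fun i => i.2))]
        rw [PySem.List.foldl_append_eq_flatMap, PySem.List.foldl_append_eq_flatMap])]
  rw [PySem.List.foldl_prod_mk
        (f := fun (c : List Int) (p : String × List (String × List (Int × Int))) =>
          c ++ p.2.flatMap (fun q => q.2.map (fun i => i.1)))
        (g := fun (c : List Int) (p : String × List (String × List (Int × Int))) =>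
          c ++ p.2.flatMap (fun q => q.2.map (fun i => i.2)))]
  rw [PySem.List.foldl_append_eq_flatMap, PySem.List.foldl_append_eq_flatMap]
  simp [pvFlatFst, pvFlatAll, pvFlatSnd]

theorem stepB_eq (ps : List String) (t : String × Int × List (String × Int × Int)) :
    (let rows := PySem.List.sorted t.2.2 (fun r => r.1) false
     let ps2 := (PySem.List.enumerate rows).foldl
       (fun (ps2 : List String) ir =>
         ps2 ++ [(if ir.1 == 0 then pvRowHead (PySem.List.len rows) t.1 else "<tr>\n")
                  ++ pvRowTds ir.2.1 ir.2.2.1 (pyDur ir.2.2.2)])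
       (ps ++ [pvTableHeader])
     ps2 ++ ["</table>\n", pvFooter t.2.1])
    = ps ++ pvPartList t := by
  simp only [PySem.List.foldl_append_singleton_eq_map]
  simp [pvPartList, pvRowsOf, pvRowStr, List.append_assoc]

theorem rowsOf_prjT (p : String × List (String × List (Int × Int))) :
    pvRowsOf (pvPrjT p) = (PySem.List.sorted p.2 (fun x => x.1) false).map pvStT := by
  show PySem.List.sorted (p.2.map pvStT) (fun r => r.1) false = _
  rw [sorted_map]
  rfl

theorem tableA_eq (LA : List (String × List (String × List (Int × Int))))
    (p : String × List (String × List (Int × Int))) (hp : p ∈ LA)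
    (h1 : (LA.map (fun x => x.1)).Nodup) (h2 : (p.2.map (fun q => q.1)).Nodup)
    (h3 : ∀ q ∈ p.2, q.2 ≠ []) :
    tableA p.1 LA = strConcat (pvPartList (pvPrjT p)) := by
  simp only [tableA, PySem.Dict.keys_mk]
  rw [lookupSelf LA p hp h1]
  rw [sorted_map (fun (x : String × List (Int × Int)) => x.1) p.2 (fun s => s)]
  set S' := PySem.List.sorted p.2 (fun x => x.1) false with hS'
  rw [enumerate_map]
  rw [List.foldl_map]
  rw [PySem.List.foldl_congr_mem _ _
      (fun (acc : String × Int) (iq : Int × String × List (Int × Int)) =>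
        ((if (iq.1 == 0) = true then
            acc.1 ++ pvRowHead (PySem.List.len (List.map (fun (x : String × List (Int × Int)) => x.1) S')) p.1
          else acc.1 ++ "<tr>\n")
          ++ pvRowTds iq.2.1 ((iq.2.2.map (fun o => o.1)).sum) (pyDur (pvCmax iq.2.2)),
         acc.2 + (iq.2.2.map (fun o => o.1)).sum)) _
      (fun acc iq hiq => by
        obtain ⟨i, q⟩ := iq
        have hq : q ∈ p.2 := by
          rcases (PySem.List.mem_enumerate_iff _ _ _).1 hiq with ⟨k, hk, hpair⟩
          have hq2 : q = S'[k] := congrArg Prod.snd hpair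
          have hmem : q ∈ S' := hq2 ▸ List.getElem_mem hk
          rw [hS'] at hmem
          exact (PySem.List.mem_sorted _ _ _ _).1 hmem
        simp [lookupSelf p.2 q hq h2, ← cmax_eq_max q.2 (h3 q hq)])]
  rw [PySem.List.foldl_prod_mk
      (f := fun (r : String) (iq : Int × String × List (Int × Int)) =>
        (if (iq.1 == 0) = true then
           r ++ pvRowHead (PySem.List.len (List.map (fun (x : String × List (Int × Int)) => x.1) S')) p.1
         else r ++ "<tr>\n")
          ++ pvRowTds iq.2.1 ((iq.2.2.map (fun o => o.1)).sum) (pyDur (pvCmax iq.2.2)))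
      (g := fun (c : Int) (iq : Int × String × List (Int × Int)) =>
        c + (iq.2.2.map (fun o => o.1)).sum)]
  rw [PySem.List.foldl_add]
  rw [PySem.List.foldl_congr_mem _ _
      (fun (r : String) (iq : Int × String × List (Int × Int)) =>
        r ++ ((if (iq.1 == 0) = true then
                 pvRowHead (PySem.List.len (List.map (fun (x : String × List (Int × Int)) => x.1) S')) p.1
               else "<tr>\n")
               ++ pvRowTds iq.2.1 ((iq.2.2.map (fun o => o.1)).sum) (pyDur (pvCmax iq.2.2)))) _
      (fun r iq _ => by by_cases hc : (iq.1 == 0) = true <;> simp [hc, String.append_assoc])]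
  rw [foldl_str_append]
  have hperm : S'.Perm p.2 := hS' ▸ PySem.List.sorted_perm _ _ _
  have hmapsum : List.map (fun (iq : Int × String × List (Int × Int)) =>
        (List.map (fun o => o.1) iq.2.2).sum) (PySem.List.enumerate S')
      = List.map (fun (q : String × List (Int × Int)) => (List.map (fun o => o.1) q.2).sum) S' := by
    conv_rhs => rw [← PySem.List.map_snd_enumerate S' 0]
    rw [List.map_map]
    rfl
  have hsum : (List.map (fun (iq : Int × String × List (Int × Int)) =>
        (List.map (fun o => o.1) iq.2.2).sum) (PySem.List.enumerate S')).sum = pvPcount p.2 := by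
    rw [hmapsum]
    have := (hperm.map (fun (q : String × List (Int × Int)) => (List.map (fun o => o.1) q.2).sum)).sum_eq
    simpa [pvPcount, pvCsum] using this
  have hrows : List.map (fun (ip : Int × String × List (Int × Int)) =>
        (if (ip.1 == 0) = true then
           pvRowHead (PySem.List.len (List.map (fun (x : String × List (Int × Int)) => x.1) S')) p.1
         else "<tr>\n")
          ++ pvRowTds ip.2.1 ((ip.2.2.map (fun o => o.1)).sum) (pyDur (pvCmax ip.2.2)))
        (PySem.List.enumerate S')
      = List.map (fun (ip : Int × String × List (Int × Int)) =>
          pvRowStr (pvPrjT p) (ip.1, pvStT ip.2)) (PySem.List.enumerate S') := by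
    apply List.map_congr_left
    intro ip _
    simp only [pvRowStr]
    rw [rowsOf_prjT]
    simp [pvPrjT, pvStT, pvCsum, PySem.List.len_eq, hS', PySem.List.length_sorted]
  have hRHS : strConcat (pvPartList (pvPrjT p))
      = pvTableHeader ++ (strConcat (List.map (fun (ip : Int × String × List (Int × Int)) =>
          pvRowStr (pvPrjT p) (ip.1, pvStT ip.2)) (PySem.List.enumerate S'))
        ++ ("</table>\n" ++ (pvFooter (pvPcount p.2) ++ ""))) := by
    simp only [pvPartList, rowsOf_prjT, enumerate_map, List.map_map]
    simp only [strConcat_append, strConcat, String.append_assoc]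
    rfl
  rw [hRHS, ← hrows]
  simp [hsum, String.append_assoc, String.append_empty]

theorem A_canon (LA : List (String × List (String × List (Int × Int))))
    (hpre : Pre_create_page LA) : create_page LA = pvCanon LA := by
  obtain ⟨h1, h2⟩ := hpre
  simp only [create_page]
  rw [Acl LA h1 (fun p hp => (h2 p hp).1)]
  rw [List.map_map]
  rw [show ((fun k => (PySem.Str.lower k, k)) ∘ fun (p : String × List (String × List (Int × Int))) => p.1)
        = fun p => (PySem.Str.lower p.1, p.1) from rfl]
  rw [sorted2_map (fun (p : String × List (String × List (Int × Int))) => (PySem.Str.lower p.1, p.1)) LA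
        (fun t => t.1) (fun t => t.2)]
  rw [List.map_map]
  rw [show ((fun (t : String × String) => t.2) ∘ fun (p : String × List (String × List (Int × Int))) =>
        (PySem.Str.lower p.1, p.1)) = fun p => p.1 from rfl]
  rw [List.foldl_map]
  rw [PySem.List.foldl_congr_mem _ _
      (fun (t : String) (p_ : String × List (String × List (Int × Int))) =>
        t ++ strConcat (pvPartList (pvPrjT p_))) _
      (fun t p_ hp_ => by
        have hpmem : p_ ∈ LA := ((PySem.List.sorted2_perm _ _ _ _).mem_iff).1 hp_
        rw [tableA_eq LA p_ hpmem h1 (h2 p_ hpmem).1 (h2 p_ hpmem).2])]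
  rw [foldl_str_append]
  simp [pvCanon, String.empty_append]

theorem sortedAgg (LA : List (String × List (String × List (Int × Int)))) :
    PySem.List.sorted2 (LA.map pvPrjT) (fun t => PySem.Str.lower t.1) (fun t => t.1) false
      = (PySem.List.sorted2 LA (fun p => PySem.Str.lower p.1) (fun p => p.1) false).map pvPrjT := by
  rw [sorted2_map]
  rfl

theorem B_canon (LA : List (String × List (String × List (Int × Int)))) :
    create_page_alt LA = pvCanon LA := by
  simp only [create_page_alt]
  rw [outFold LA [] 0 [0]]
  simp only [List.nil_append, zero_add, List.singleton_append]
  rw [median_eq, total_eq]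
  rw [sortedAgg]
  rw [List.foldl_map]
  rw [PySem.List.foldl_congr_mem _ _
      (fun (ps : List String) (p_ : String × List (String × List (Int × Int))) =>
        ps ++ pvPartList (pvPrjT p_)) _
      (fun ps p_ _ => stepB_eq ps (pvPrjT p_))]
  rw [PySem.List.foldl_append_eq_flatMap]
  rw [join_empty_eq_strConcat]
  simp [pvCanon, strConcat, strConcat_flatMap, String.append_assoc]

-- ===== VERDICT (by name: the statement is the Claim_ definition above) =====
theorem create_page_spec : Claim_equal_create_page := by
  intro LA _ hpre
  unfold Spec_create_page
  rw [A_canon LA hpre, B_canon LA]
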